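-- pv_equiv track=rewrite | github.com/lubuntu-team/britney2-ubuntu | britney2/policies/email.py | address_chooser
-- ===== SOURCE A (Python) =====
-- def address_chooser(addresses):
--     """Prefer @ubuntu and @canonical addresses."""
--     first = ""
--     canonical = ""
--     for address in addresses:
--         if address.endswith("@ubuntu.com"):
--             return address
--         if address.endswith("@canonical.com"):
--             canonical = address
--         if not first:
--             first = address
--     return canonical or first
-- ===== SOURCE B (Python) =====
-- def address_chooser(addresses):
--     """Prefer @ubuntu and @canonical addresses."""
--     addresses = list(addresses)
--     ubuntu = [a for a in addresses if a.endswith("@ubuntu.com")]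
--     if ubuntu:
--         return ubuntu[0]
--     canonical = [a for a in addresses if a.endswith("@canonical.com")]
--     if canonical:
--         return canonical[-1]
--     nonempty = [a for a in addresses if a]
--     return nonempty[0] if nonempty else ""
-- ===== Notes on version B (the rewrite author's own statement) =====
-- stated objective: simpler
-- what changed: Replaces the single early-exit loop with mutable accumulators by a categorize-then-select structure: filter the ubuntu, canonical and non-empty addresses into lists, then pick first-ubuntu, else last-canonical, else first non-empty.
import Mathlib
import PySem

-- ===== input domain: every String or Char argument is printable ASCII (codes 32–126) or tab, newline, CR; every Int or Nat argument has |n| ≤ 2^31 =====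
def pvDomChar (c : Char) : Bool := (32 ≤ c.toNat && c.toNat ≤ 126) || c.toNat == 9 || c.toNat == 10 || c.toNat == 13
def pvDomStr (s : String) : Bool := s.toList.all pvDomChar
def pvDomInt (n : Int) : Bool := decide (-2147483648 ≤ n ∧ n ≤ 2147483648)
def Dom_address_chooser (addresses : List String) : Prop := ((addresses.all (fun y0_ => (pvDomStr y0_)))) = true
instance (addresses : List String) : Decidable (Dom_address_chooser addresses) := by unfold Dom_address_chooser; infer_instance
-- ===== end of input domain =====

-- B replaces A's single early-exit loop with accumulators by filter-then-select lists (objective: simpler).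

-- ===== PORT A =====
-- the loop of A: state (first, canonical), early return on an @ubuntu.com address
def addressChooserLoop : List String → String → String → String
  | [], first, canonical => if canonical ≠ "" then canonical else first
  | a :: rest, first, canonical =>
    if PySem.Str.endswith a "@ubuntu.com" then a
    else
      let canonical' := if PySem.Str.endswith a "@canonical.com" then a else canonical
      let first' := if first = "" then a else first
      addressChooserLoop rest first' canonical'

def address_chooser (addresses : List String) : String :=
  addressChooserLoop addresses "" ""

-- ===== PORT B =====
def address_chooser_alt (addresses : List String) : String :=
  let ubuntu := addresses.filter (fun a => PySem.Str.endswith a "@ubuntu.com")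
  match ubuntu with
  | u :: _ => u
  | [] =>
    let canonical := addresses.filter (fun a => PySem.Str.endswith a "@canonical.com")
    if canonical ≠ [] then canonical.getLastD ""   -- canonical[-1] of a non-empty list
    else
      let nonempty := addresses.filter (fun a => a ≠ "")
      match nonempty with
      | n :: _ => n
      | [] => ""

-- ===== PRECONDITION & SPEC =====
def Spec_address_chooser (addresses : List String) (out : String) : Prop := out = address_chooser_alt addresses
instance (addresses : List String) (out : String) : Decidable (Spec_address_chooser addresses out) := by unfold Spec_address_chooser; infer_instance

-- ===== CLAIM (what is proved, stated in full; the proofs are below) =====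
def Claim_equal_address_chooser : Prop := ∀ (addresses : List String), Dom_address_chooser addresses → Spec_address_chooser addresses (address_chooser addresses)

-- ===== LEMMAS AND PROOFS =====

-- closed-term facts used when the current address is the empty string
theorem endswith_empty_ubuntu : PySem.Str.endswith "" "@ubuntu.com" = false := by decide
theorem endswith_empty_canonical : PySem.Str.endswith "" "@canonical.com" = false := by decide

-- characterisation of A's loop in terms of filtered lists and the two accumulators
theorem addressChooserLoop_eq (l : List String) (first canonical : String) :
    addressChooserLoop l first canonical =
      match l.filter (fun a => PySem.Str.endswith a "@ubuntu.com") with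
      | u :: _ => u
      | [] =>
        let c := (l.filter (fun a => PySem.Str.endswith a "@canonical.com")).getLastD canonical
        if c ≠ "" then c
        else if first ≠ "" then first
        else ((l.filter (fun a => a ≠ "")).headD "") := by
  induction l generalizing first canonical with
  | nil =>
    by_cases h1 : canonical = "" <;> by_cases h2 : first = "" <;>
      simp [addressChooserLoop, h1, h2]
  | cons a rest ih =>
    simp only [addressChooserLoop]
    by_cases hu : PySem.Str.endswith a "@ubuntu.com"
    · rw [if_pos hu]
      simp only [List.filter_cons, hu, if_true]
    · rw [if_neg hu, ih]
      by_cases hc : PySem.Str.endswith a "@canonical.com" <;>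
        by_cases hf : first = "" <;>
          by_cases ha : a = "" <;>
            simp only [List.filter_cons, hu, hc, hf, ha, decide_true, decide_false,
              endswith_empty_ubuntu, endswith_empty_canonical, Bool.false_eq_true,
              if_true, if_false, ne_eq, not_false_eq_true,
              not_true_eq_false, List.getLastD_cons, List.headD_cons, decide_not,
              Bool.not_false, Bool.not_true]

theorem endswith_canonical_ne_empty (s : String)
    (h : PySem.Str.endswith s "@canonical.com" = true) : s ≠ "" := by
  intro he; subst he; revert h; decide

-- ===== VERDICT (by name: the statement is the Claim_ definition above) =====
theorem address_chooser_spec : Claim_equal_address_chooser := by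
  intro addresses _
  unfold Spec_address_chooser address_chooser address_chooser_alt
  rw [addressChooserLoop_eq]
  cases hU : addresses.filter (fun a => PySem.Str.endswith a "@ubuntu.com") with
  | cons u us => rfl
  | nil =>
    cases hC : addresses.filter (fun a => PySem.Str.endswith a "@canonical.com") with
    | nil =>
      cases hN : addresses.filter (fun a => a ≠ "") with
      | nil => simp
      | cons n ns => simp
    | cons c cs =>
      have hmem : (c :: cs).getLastD "" ∈ c :: cs := by
        rw [List.getLastD_eq_getLast?]
        cases h : (c :: cs).getLast? with
        | none => simp at h
        | some x => simpa using List.mem_of_getLast? h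
      have hmem' : (c :: cs).getLastD "" ∈
          addresses.filter (fun a => PySem.Str.endswith a "@canonical.com") := by
        rw [hC]; exact hmem
      have hcan : PySem.Str.endswith ((c :: cs).getLastD "") "@canonical.com" = true :=
        (List.mem_filter.mp hmem').2
      have hne : (c :: cs).getLastD "" ≠ "" := endswith_canonical_ne_empty _ hcan
      rw [List.getLastD_eq_getLast?] at hne
      simp [hne]
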